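-- pv_equiv track=rewrite | github.com/jubaer-hossain/CORE | Graph FINAL/Single cycle check.py | hasSingleCycle
-- ===== SOURCE A (Python) =====
-- def hasSingleCycle(array):
--     START_IDX = 0
--     currentIdx = START_IDX
--
--     numElementsVisited = 0
--
--     # 1. We run the loop until we visited EXACTLY N elements
--     while numElementsVisited < len(array):
--
--         # 2. This one line checks if the array has multiple cycle or broken single cycle where there is a cycle but we never visit certain elements
--         if numElementsVisited > 0 and currentIdx == START_IDX:
--             return False
--
--         # 3. Increase elements visited and get nextIdx
--         numElementsVisited += 1
--         nextIdx = getNextIdx(currentIdx, array)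
--
--         # 4. Update currentIdx
--         currentIdx = nextIdx
--
--     # 5. Finally we need to check if we are at START when we broke out of the loop
--     return currentIdx == START_IDX
--
-- def getNextIdx(currentIdx, array):
--     jump = array[currentIdx]
--
--     nextIdx = (currentIdx + jump) % len(array)
--
--     # i = 0, 1, 2, 3, 4
--     #  [-6, 2, 3, 4, 5] Basically an array of len 5 has the last idx at i = 4. So if nextIdx = -1 then it means its the last idx of the array. So we can get that by adding the negative idx with the len of the array
--     return nextIdx if nextIdx >= 0 else nextIdx + len(array)
-- ===== SOURCE B (Python) =====
-- def hasSingleCycle(array):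
--     n = len(array)
--     visited = set()
--     currentIdx = 0
--     for _ in range(n):
--         visited.add(currentIdx)
--         currentIdx = (currentIdx + array[currentIdx]) % n
--     return len(visited) == n and currentIdx == 0
-- ===== Notes on version B (the rewrite author's own statement) =====
-- stated objective: simpler
-- what changed: B walks exactly n steps with no early return, recording each visited index into a set, and decides by 'len(visited) == n and currentIdx == 0' instead of A's counter-plus-early-return-to-start loop and helper function.
import Mathlib
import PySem

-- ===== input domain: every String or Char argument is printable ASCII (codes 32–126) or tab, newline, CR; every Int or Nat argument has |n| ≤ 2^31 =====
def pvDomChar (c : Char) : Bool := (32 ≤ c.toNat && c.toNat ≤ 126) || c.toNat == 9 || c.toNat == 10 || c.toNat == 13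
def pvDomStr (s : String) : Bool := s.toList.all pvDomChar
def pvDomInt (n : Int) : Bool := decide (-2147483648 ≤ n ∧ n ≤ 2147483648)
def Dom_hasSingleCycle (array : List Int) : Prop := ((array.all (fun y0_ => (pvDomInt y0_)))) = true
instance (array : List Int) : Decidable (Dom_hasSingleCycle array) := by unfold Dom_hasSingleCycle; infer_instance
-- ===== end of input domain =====

-- B replaces A's counter-plus-early-return-to-start loop with a fixed n-step walk that records
-- visited indices into a set and decides by |visited| = n and final index = 0 (objective: simpler).


-- ===== PORT A =====
-- getNextIdx: array[currentIdx] via pyGet?; currentIdx is always in [0, len) at every call site,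
-- so the .getD 0 default is never taken and the port is exact there.
def getNextIdx (currentIdx : Int) (array : List Int) : Int :=
  let jump := (PySem.List.pyGet? array currentIdx).getD 0
  let nextIdx := PySem.Int.mod (currentIdx + jump) (PySem.List.len array)
  if nextIdx ≥ 0 then nextIdx else nextIdx + PySem.List.len array

-- the while loop: fuel = len(array) - numElementsVisited
def hscLoopA (array : List Int) : Nat → Nat → Int → Bool
  | 0, _, currentIdx => currentIdx == 0
  | fuel + 1, numVisited, currentIdx =>
    if 0 < numVisited ∧ currentIdx = 0 then false
    else hscLoopA array fuel (numVisited + 1) (getNextIdx currentIdx array)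

def hasSingleCycle (array : List Int) : Bool :=
  hscLoopA array array.length 0 0

-- ===== PORT B =====
-- the for loop of Source B: k steps remaining, carrying (visited, currentIdx)
def hscLoopB (array : List Int) : Nat → PySem.Set Int → Int → PySem.Set Int × Int
  | 0, visited, currentIdx => (visited, currentIdx)
  | k + 1, visited, currentIdx =>
    let visited' := PySem.Set.add visited currentIdx
    let jump := (PySem.List.pyGet? array currentIdx).getD 0
    hscLoopB array k visited' (PySem.Int.mod (currentIdx + jump) (PySem.List.len array))

def hasSingleCycle_alt (array : List Int) : Bool :=
  let r := hscLoopB array array.length PySem.Set.empty 0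
  (PySem.Set.len r.1 == PySem.List.len array) && (r.2 == 0)

-- ===== PRECONDITION & SPEC =====
def Spec_hasSingleCycle (array : List Int) (out : Bool) : Prop := out = hasSingleCycle_alt array
instance (array : List Int) (out : Bool) : Decidable (Spec_hasSingleCycle array out) := by unfold Spec_hasSingleCycle; infer_instance

-- ===== CLAIM (what is proved, stated in full; the proofs are below) =====
def Claim_equal_hasSingleCycle : Prop := ∀ (array : List Int), Dom_hasSingleCycle array → Spec_hasSingleCycle array (hasSingleCycle array)

-- ===== LEMMAS AND PROOFS =====

-- the common step function and the walk p k = position after k steps from 0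
def pvStep (array : List Int) (i : Int) : Int :=
  PySem.Int.mod (i + (PySem.List.pyGet? array i).getD 0) (PySem.List.len array)

def pvWalk (array : List Int) (k : Nat) : Int := (pvStep array)^[k] 0

theorem pvWalk_zero (array : List Int) : pvWalk array 0 = 0 := rfl

theorem pvWalk_succ (array : List Int) (k : Nat) :
    pvWalk array (k + 1) = pvStep array (pvWalk array k) := by
  simp [pvWalk, Function.iterate_succ_apply']

theorem getNextIdx_eq_step (array : List Int) (h : 0 < array.length) (i : Int) :
    getNextIdx i array = pvStep array i := by
  have hpos : (0 : Int) < PySem.List.len array := by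
    simp [PySem.List.len_eq]; exact_mod_cast h
  have hnn := PySem.Int.mod_nonneg (i + (PySem.List.pyGet? array i).getD 0) hpos
  simp only [getNextIdx, pvStep]
  rw [if_pos hnn]

-- characterisation of A's while loop, for numVisited ≥ 1
theorem loopA_iff (array : List Int) (h : 0 < array.length) :
    ∀ (fuel v : Nat), 1 ≤ v →
      (hscLoopA array fuel v (pvWalk array v) = true ↔
        ((∀ k, v ≤ k → k < v + fuel → pvWalk array k ≠ 0) ∧ pvWalk array (v + fuel) = 0)) := by
  intro fuel
  induction fuel with
  | zero =>
    intro v _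
    simp [hscLoopA]
    intro _ k hk1 hk2; omega
  | succ m ih =>
    intro v hv
    rw [hscLoopA]
    by_cases hz : pvWalk array v = 0
    · have : (0 < v ∧ pvWalk array v = 0) := ⟨hv, hz⟩
      simp only [if_pos this]
      constructor
      · intro hfalse; exact absurd hfalse (by simp)
      · rintro ⟨hall, -⟩
        exact absurd hz (hall v le_rfl (by omega))
    · have hcond : ¬ (0 < v ∧ pvWalk array v = 0) := by tauto
      simp only [if_neg hcond]
      rw [getNextIdx_eq_step array h, ← pvWalk_succ]
      rw [ih (v + 1) (by omega)]
      constructor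
      · rintro ⟨hall, hend⟩
        refine ⟨?_, by rw [show v + (m + 1) = v + 1 + m by omega]; exact hend⟩
        intro k hk1 hk2
        rcases Nat.eq_or_lt_of_le hk1 with rfl | hlt
        · exact hz
        · exact hall k hlt (by omega)
      · rintro ⟨hall, hend⟩
        refine ⟨fun k hk1 hk2 => hall k (by omega) (by omega), ?_⟩
        rw [show v + 1 + m = v + (m + 1) by omega]; exact hend

-- A's value, for nonempty arrays
theorem hasSingleCycle_iff (array : List Int) (h : 0 < array.length) :
    hasSingleCycle array = true ↔
      ((∀ k, 1 ≤ k → k < array.length → pvWalk array k ≠ 0) ∧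
        pvWalk array array.length = 0) := by
  obtain ⟨m, hm⟩ : ∃ m, array.length = m + 1 := ⟨array.length - 1, by omega⟩
  unfold hasSingleCycle
  rw [hm, hscLoopA]
  have hcond : ¬ (0 < 0 ∧ (0 : Int) = 0) := by simp
  rw [if_neg hcond]
  have h0 : getNextIdx 0 array = pvWalk array 1 := by
    rw [pvWalk_succ, pvWalk_zero, getNextIdx_eq_step array h]
  rw [h0, loopA_iff array h m 1 le_rfl]
  constructor
  · rintro ⟨hall, hend⟩
    exact ⟨fun k hk1 hk2 => hall k hk1 (by omega), by rw [show m + 1 = 1 + m by omega]; exact hend⟩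
  · rintro ⟨hall, hend⟩
    exact ⟨fun k hk1 hk2 => hall k hk1 (by omega), by rw [show 1 + m = m + 1 by omega]; exact hend⟩

-- characterisation of B's loop
theorem loopB_eq (array : List Int) :
    ∀ (k : Nat) (visited : PySem.Set Int) (cur : Int),
      hscLoopB array k visited cur =
        (List.foldl PySem.Set.add visited
          ((List.range k).map (fun t => (pvStep array)^[t] cur)), (pvStep array)^[k] cur) := by
  intro k
  induction k with
  | zero => intro visited cur; simp [hscLoopB]
  | succ m ih =>
    intro visited cur
    rw [hscLoopB]
    show hscLoopB array m (PySem.Set.add visited cur) (pvStep array cur) = _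
    rw [ih]
    have hlist : (List.range (m + 1)).map (fun t => (pvStep array)^[t] cur) =
        cur :: (List.range m).map (fun t => (pvStep array)^[t] (pvStep array cur)) := by
      rw [List.range_succ_eq_map, List.map_cons, List.map_map]
      refine congrArg₂ _ (by simp) ?_
      apply List.map_congr_left
      intro a _
      simp [Function.comp, Nat.succ_eq_add_one, Function.iterate_succ_apply]
    rw [hlist]
    simp [List.foldl_cons, Function.iterate_succ_apply]

-- B's value as a proposition
theorem hasSingleCycle_alt_iff (array : List Int) :
    hasSingleCycle_alt array = true ↔
      ((PySem.Set.ofList ((List.range array.length).map (pvWalk array))).length = array.length ∧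
        pvWalk array array.length = 0) := by
  unfold hasSingleCycle_alt
  rw [loopB_eq]
  have : PySem.Set.ofList ((List.range array.length).map (pvWalk array)) =
      List.foldl PySem.Set.add PySem.Set.empty
        ((List.range array.length).map (fun t => (pvStep array)^[t] 0)) := by
    rw [PySem.Set.ofList_eq_foldl]; rfl
  rw [← this]
  simp [PySem.Set.len, PySem.List.len_eq, pvWalk]

-- distinct-count of a list equals its length iff it has no duplicates
theorem ofList_length_eq_iff {l : List Int} :
    (PySem.Set.ofList l).length = l.length ↔ l.Nodup := by
  have hperm : (PySem.Set.ofList l).Perm l.dedup := by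
    rw [List.perm_ext_iff_of_nodup (PySem.Set.nodup_ofList l) l.nodup_dedup]
    intro a; rw [PySem.Set.mem_ofList, List.mem_dedup]
  rw [hperm.length_eq]
  constructor
  · intro hlen
    exact List.dedup_eq_self.mp ((List.dedup_sublist l).eq_of_length hlen)
  · intro hnd
    rw [List.dedup_eq_self.mpr hnd]

-- determinism: equal positions propagate
theorem pvWalk_shift (array : List Int) {i j : Nat} (hij : pvWalk array i = pvWalk array j) :
    ∀ t, pvWalk array (i + t) = pvWalk array (j + t) := by
  intro t
  have h1 : pvWalk array (i + t) = (pvStep array)^[t] (pvWalk array i) := by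
    simp [pvWalk, Nat.add_comm i t, Function.iterate_add_apply]
  have h2 : pvWalk array (j + t) = (pvStep array)^[t] (pvWalk array j) := by
    simp [pvWalk, Nat.add_comm j t, Function.iterate_add_apply]
  rw [h1, h2, hij]

-- periodicity once a position repeats
theorem pvWalk_period (array : List Int) {i d : Nat} (hd : 0 < d)
    (hrep : pvWalk array i = pvWalk array (i + d)) :
    ∀ t, pvWalk array (i + t) = pvWalk array (i + t % d) := by
  intro t
  induction t using Nat.strong_induction_on with
  | _ t ih =>
    by_cases ht : t < d
    · rw [Nat.mod_eq_of_lt ht]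
    · have hsplit : t = (t - d) + d := by omega
      have h2 := pvWalk_shift array hrep (t - d)
      have step1 : pvWalk array (i + t) = pvWalk array (i + (t - d)) := by
        rw [show i + t = i + d + (t - d) by omega, ← h2]
      have h3 : (t - d) % d = t % d := by
        conv_rhs => rw [hsplit, Nat.add_mod_right]
      rw [step1, ih (t - d) (by omega), h3]

-- from a repeated position strictly before the end, a return to 0 happens too early
theorem pvWalk_collision (array : List Int)
    (hend : pvWalk array array.length = 0)
    (hne : ∀ k, 1 ≤ k → k < array.length → pvWalk array k ≠ 0)
    {i j : Nat} (hj : j < array.length) (hlt : i < j)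
    (hij : pvWalk array i = pvWalk array j) : False := by
  set n := array.length with hn
  set d := j - i with hd
  have hdpos : 0 < d := by omega
  have hrep : pvWalk array i = pvWalk array (i + d) := by
    rw [show i + d = j by omega]; exact hij
  have hper := pvWalk_period array hdpos hrep (n - i)
  rw [show i + (n - i) = n by omega] at hper
  set m := i + (n - i) % d with hm
  have hmlt : m < n := by
    have : (n - i) % d < d := Nat.mod_lt _ hdpos
    omega
  have hm0 : pvWalk array m = 0 := by rw [← hper]; exact hend
  by_cases h1 : 1 ≤ m
  · exact hne m h1 hmlt hm0
  · -- m = 0, hence i = 0, so pvWalk j = pvWalk 0 = 0 with 1 ≤ j < n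
    have hi0 : i = 0 := by omega
    have : pvWalk array j = 0 := by
      rw [← hij, hi0, pvWalk_zero]
    exact hne j (by omega) hj this

-- the heart: with final position 0, "never back at 0 early" = "all positions distinct"
theorem noEarly_iff_injOn (array : List Int) (hend : pvWalk array array.length = 0) :
    (∀ k, 1 ≤ k → k < array.length → pvWalk array k ≠ 0) ↔
      (∀ i, i < array.length → ∀ j, j < array.length →
        pvWalk array i = pvWalk array j → i = j) := by
  constructor
  · intro hne i hi j hj hij
    rcases Nat.lt_trichotomy i j with hlt | heq | hgt
    · exact (pvWalk_collision array hend hne hj hlt hij).elim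
    · exact heq
    · exact (pvWalk_collision array hend hne hi hgt hij.symm).elim
  · intro hinj k hk1 hk2 hk0
    have : k = 0 := hinj k hk2 0 (by omega) (by rw [hk0, pvWalk_zero])
    omega

-- ===== VERDICT (by name: the statement is the Claim_ definition above) =====
theorem hasSingleCycle_spec : Claim_equal_hasSingleCycle := by
  intro array _
  unfold Spec_hasSingleCycle
  by_cases h : 0 < array.length
  · have hA := hasSingleCycle_iff array h
    have hB := hasSingleCycle_alt_iff array
    have hLlen : ((List.range array.length).map (pvWalk array)).length = array.length := by simp
    have hNd := List.nodup_map_iff_inj_on (f := pvWalk array) (List.nodup_range (n := array.length))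
    rw [Bool.eq_iff_iff, hA, hB]
    constructor
    · rintro ⟨hall, hend⟩
      refine ⟨?_, hend⟩
      have hnodup : ((List.range array.length).map (pvWalk array)).Nodup := by
        rw [hNd]
        intro i hi j hj hij
        rw [List.mem_range] at hi hj
        exact (noEarly_iff_injOn array hend).mp hall i hi j hj hij
      rw [ofList_length_eq_iff.mpr hnodup, hLlen]
    · rintro ⟨hlen, hend⟩
      refine ⟨?_, hend⟩
      have hnodup : ((List.range array.length).map (pvWalk array)).Nodup := by
        apply ofList_length_eq_iff.mp
        rw [hlen, hLlen]
      apply (noEarly_iff_injOn array hend).mpr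
      intro i hi j hj hij
      exact hNd.mp hnodup i (List.mem_range.mpr hi) j (List.mem_range.mpr hj) hij
  · have hlen : array.length = 0 := by omega
    have : array = [] := List.length_eq_zero_iff.mp hlen
    subst this
    decide
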